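-- pv_equiv track=rewrite | github.com/LEENAMHWA/iwannabeacodingmaster | Self_Practice/D_struct_06_P43164.py | bfs
-- ===== SOURCE A (Python) =====
-- from collections import deque
--
-- def bfs(tickets):
--     visited = [False for x in tickets]
--     queue = deque()
--     trav_path = []
--
--     # INIT
--     for item_idx in range(len(tickets)):
--         if tickets[item_idx][0] == "ICN":
--             remained = []
--             remained.extend(tickets)
--             remained.pop(remained.index(tickets[item_idx]))
--             queue.append([tickets[item_idx], [tickets[item_idx]], remained])
--
--     idx = 0
--     while queue:
--         idx += 1
--         tmp_path, visited, remained = queue.popleft()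
--         if len(tickets) == len(visited):
--             trav_path.append(visited)
--
--         for path_idx in range(len(tickets)):
--             visit_tmp = []
--             visit_tmp.extend(visited)
--
--             remained_tmp = []
--             remained_tmp.extend(remained)
--
--             if tickets[path_idx][0] == visited[-1][1]:
--                 if tickets[path_idx] not in remained_tmp:
--                     continue
--                 else:
--                     visit_tmp.append(tickets[path_idx])
--                     remained_tmp.pop(remained_tmp.index(tickets[path_idx]))
--                     queue.append([tickets[path_idx],visit_tmp, remained_tmp])
--     return trav_path
-- ===== SOURCE B (Python) =====
-- def bfs(tickets):
--     results = []
--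
--     def dfs(path, remained):
--         if not remained:
--             results.append(path)
--             return
--         last = path[-1][1]
--         for t in tickets:
--             if t[0] == last and t in remained:
--                 nxt = list(remained)
--                 nxt.remove(t)
--                 dfs(path + [t], nxt)
--
--     for t in tickets:
--         if t[0] == "ICN":
--             start = list(tickets)
--             start.remove(t)
--             dfs([t], start)
--     return results
-- ===== Notes on version B (the rewrite author's own statement) =====
-- stated objective: simpler
-- what changed: Replaces A's deque-driven BFS (explicit queue of copied [ticket, path, remained] states, dead visited/idx variables) by a short recursive DFS over (path, remaining tickets); the emission order is unchanged because every complete route sits at the same depth, where BFS pop order equals DFS left-to-right order.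
-- outside the precondition, e.g. on bfs([['ICN', 'AAA'], ['BBB']]): A returns [], B returns []
import Mathlib
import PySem

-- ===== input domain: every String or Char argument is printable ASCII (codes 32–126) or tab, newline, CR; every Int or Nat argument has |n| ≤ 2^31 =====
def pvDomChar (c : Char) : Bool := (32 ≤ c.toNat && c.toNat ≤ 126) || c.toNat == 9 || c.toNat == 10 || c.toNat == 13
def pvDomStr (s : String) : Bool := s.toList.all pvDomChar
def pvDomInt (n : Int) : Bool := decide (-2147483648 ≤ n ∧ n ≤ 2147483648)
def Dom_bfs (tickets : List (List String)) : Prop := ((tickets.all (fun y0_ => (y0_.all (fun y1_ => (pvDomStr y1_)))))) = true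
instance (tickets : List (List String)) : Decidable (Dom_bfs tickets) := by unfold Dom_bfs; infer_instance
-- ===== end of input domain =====

-- B replaces A's deque-based BFS (explicit state copies in a while loop) by a recursive
-- DFS over (path, remaining tickets); objective: simpler.  Equivalence of the RETURN value.

-- ===== PORT A =====
-- A's INIT loop: one queue entry per ticket whose [0] is "ICN" (first occurrence removed from the copy).
def initA (tickets : List (List String)) :
    List (List String) → List ((List String) × List (List String) × List (List String))
  | [] => []
  | t :: rest =>
    (if PySem.List.pyGet? t 0 = some "ICN" then
        match PySem.List.remove? tickets t with
        | some rem => [(t, [t], rem)]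
        | none => []                                  -- unreachable: t is drawn from tickets
      else []) ++ initA tickets rest
-- A's inner for-loop over path_idx: the entries appended to the queue for one popped state.
def innerA (tickets : List (List String)) (vis rem : List (List String)) :
    List (List String) → List ((List String) × List (List String) × List (List String))
  | [] => []
  | t :: rest =>
    (if PySem.List.pyGet? t 0 = ((PySem.List.pyGet? vis (-1)).bind (fun last => PySem.List.pyGet? last 1))
        ∧ t ∈ rem then
        match PySem.List.remove? rem t with
        | some rem' => [(t, vis ++ [t], rem')]
        | none => []                                  -- unreachable: the guard checked t ∈ rem
      else []) ++ innerA tickets vis rem rest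

-- helper lemmas needed by loopA's termination proof (cited in decreasing_by)
theorem remove?_length_succ {α : Type} [BEq α] [LawfulBEq α] {xs r : List α} {v : α}
    (h : PySem.List.remove? xs v = some r) : r.length + 1 = xs.length := by
  have hv : v ∈ xs := by
    by_contra hc
    rw [(PySem.List.remove?_eq_none_iff xs v).mpr hc] at h
    simp at h
  have hr : r = xs.erase v := by
    rw [PySem.List.remove?_eq_some_erase xs v hv] at h
    exact (Option.some.inj h).symm
  subst hr
  have h1 := List.length_erase_of_mem hv
  have h2 := List.length_pos_of_mem hv
  omega

theorem innerA_rem_length {tickets vis rem : List (List String)} :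
    ∀ {ts : List (List String)} {e}, e ∈ innerA tickets vis rem ts →
      e.2.1.length = vis.length + 1 ∧ e.2.2.length + 1 = rem.length := by
  intro ts
  induction ts with
  | nil => intro e h; simp [innerA] at h
  | cons t rest ih =>
    intro e h
    simp only [innerA, List.mem_append] at h
    rcases h with h | h
    · split at h
      · rename_i hg
        rcases hr : PySem.List.remove? rem t with _ | rem'
        · rw [hr] at h; simp at h
        · rw [hr] at h
          simp at h
          subst h
          exact ⟨by simp, remove?_length_succ hr⟩
      · simp at h
    · exact ih h

theorem innerA_length_le {tickets vis rem : List (List String)} :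
    ∀ {ts : List (List String)}, (innerA tickets vis rem ts).length ≤ ts.length := by
  intro ts
  induction ts with
  | nil => simp [innerA]
  | cons t rest ih =>
    simp only [innerA, List.length_append, List.length_cons]
    split
    · split <;> simp <;> omega
    · simpa using Nat.le_succ_of_le ih

def qMeasure (n : Nat) (q : List ((List String) × List (List String) × List (List String))) : Nat :=
  (q.map (fun e => (n + 1) ^ e.2.2.length)).sum

theorem qMeasure_step {tickets vis rem : List (List String)} {c : List String}
    {q : List ((List String) × List (List String) × List (List String))} :
    qMeasure tickets.length (q ++ innerA tickets vis rem tickets) <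
      qMeasure tickets.length ((c, vis, rem) :: q) := by
  have hsum : qMeasure tickets.length (innerA tickets vis rem tickets) <
      (tickets.length + 1) ^ rem.length := by
    rcases hrem : rem with _ | ⟨r0, rtl⟩
    · have hnil : innerA tickets vis [] tickets = [] := by
        have h : ∀ ts : List (List String), innerA tickets vis [] ts = [] := by
          intro ts
          induction ts with
          | nil => simp [innerA]
          | cons t rest ih => simp [innerA, ih]
        exact h tickets
      simp [hnil, qMeasure]
    · -- every entry weighs (n+1)^(rem.length-1); there are at most tickets.length of them
      have hval : ∀ x ∈ (innerA tickets vis (r0 :: rtl) tickets).map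
          (fun e => (tickets.length + 1) ^ e.2.2.length),
          x ≤ (tickets.length + 1) ^ rtl.length := by
        intro x hx
        rcases List.mem_map.mp hx with ⟨e, he, rfl⟩
        have h2 := (innerA_rem_length he).2
        simp only [List.length_cons] at h2
        rw [show e.2.2.length = rtl.length by omega]
      have hb := List.sum_le_card_nsmul
        ((innerA tickets vis (r0 :: rtl) tickets).map
          (fun e => (tickets.length + 1) ^ e.2.2.length))
        ((tickets.length + 1) ^ rtl.length) hval
      simp only [List.length_map, smul_eq_mul] at hb
      have hcnt : (innerA tickets vis (r0 :: rtl) tickets).length ≤ tickets.length :=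
        innerA_length_le
      have hpos : 0 < (tickets.length + 1) ^ rtl.length := Nat.pow_pos (by omega)
      have hlt : tickets.length * (tickets.length + 1) ^ rtl.length <
          (tickets.length + 1) ^ (rtl.length + 1) := by
        rw [pow_succ, mul_comm ((tickets.length + 1) ^ rtl.length) (tickets.length + 1)]
        exact Nat.mul_lt_mul_of_lt_of_le (by omega) (le_refl _) hpos
      unfold qMeasure
      calc ((innerA tickets vis (r0 :: rtl) tickets).map
            (fun e => (tickets.length + 1) ^ e.2.2.length)).sum
          ≤ (innerA tickets vis (r0 :: rtl) tickets).length * (tickets.length + 1) ^ rtl.length := hb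
        _ ≤ tickets.length * (tickets.length + 1) ^ rtl.length :=
            Nat.mul_le_mul_right _ hcnt
        _ < (tickets.length + 1) ^ (r0 :: rtl).length := by simpa using hlt
  have hsplit : qMeasure tickets.length (q ++ innerA tickets vis rem tickets) =
      qMeasure tickets.length q + qMeasure tickets.length (innerA tickets vis rem tickets) := by
    simp [qMeasure]
  have hcons : qMeasure tickets.length ((c, vis, rem) :: q) =
      (tickets.length + 1) ^ rem.length + qMeasure tickets.length q := by
    simp [qMeasure]
  omega

-- A's while loop over the deque (emissions returned in pop order = trav_path).
def loopA (tickets : List (List String)) :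
    List ((List String) × List (List String) × List (List String)) → List (List (List String))
  | [] => []
  | (_c, vis, rem) :: q =>
    (if tickets.length = vis.length then [vis] else []) ++
      loopA tickets (q ++ innerA tickets vis rem tickets)
termination_by q => qMeasure tickets.length q
decreasing_by exact qMeasure_step

def bfs (tickets : List (List String)) : List (List (List String)) :=
  loopA tickets (initA tickets tickets)

-- ===== PORT B =====
mutual
-- B's dfs(path, remained): returns the list it would append to results, in order.
def dfsB (tickets path remained : List (List String)) : List (List (List String)) :=
  if remained = [] then [path]
  else
    goB tickets path remained
      ((PySem.List.pyGet? path (-1)).bind (fun last => PySem.List.pyGet? last 1)) tickets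
termination_by (remained.length + 1) * (tickets.length + 1)
decreasing_by simp only [Nat.succ_mul]; omega

-- B's inner `for t in tickets` loop.
def goB (tickets path remained : List (List String)) (last : Option String)
    (ts : List (List String)) : List (List (List String)) :=
  match ts with
  | [] => []
  | t :: rest =>
    (if PySem.List.pyGet? t 0 = last ∧ t ∈ remained then
        match hr : PySem.List.remove? remained t with
        | some r' => dfsB tickets (path ++ [t]) r'
        | none => []                                  -- unreachable: the guard checked t ∈ remained
      else []) ++ goB tickets path remained last rest
termination_by remained.length * (tickets.length + 1) + ts.length
decreasing_by
  · rw [remove?_length_succ hr]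
    simp only [List.length_cons]
    omega
  · simp only [List.length_cons]
    omega
end

-- B's seeding loop over tickets whose [0] is "ICN".
def seedB (tickets : List (List String)) : List (List String) → List (List (List String))
  | [] => []
  | t :: rest =>
    (if PySem.List.pyGet? t 0 = some "ICN" then
        match PySem.List.remove? tickets t with
        | some start => dfsB tickets [t] start
        | none => []                                  -- unreachable: t is drawn from tickets
      else []) ++ seedB tickets rest

def bfs_alt (tickets : List (List String)) : List (List (List String)) :=
  seedB tickets tickets

-- ===== PRECONDITION & SPEC =====
-- Pre_ restricts to the natural domain of [origin, destination] ticket pairs: on inputs with an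
-- empty ticket, or with a ticket shorter than 2 while some "ICN"-headed ticket exists, the Python A
-- raises IndexError on most of them (always for an empty ticket); on the few such malformed inputs
-- where A still happens to return, both programs return the same empty result (see claim cites).
def Pre_bfs (tickets : List (List String)) : Prop :=
  (∀ t ∈ tickets, 1 ≤ t.length) ∧
    ((∃ t ∈ tickets, PySem.List.pyGet? t 0 = some "ICN") → ∀ t ∈ tickets, 2 ≤ t.length)
instance (tickets : List (List String)) : Decidable (Pre_bfs tickets) := by
  unfold Pre_bfs; infer_instance

def pvWitness_bfs : List (List String) := [["ICN", "AAA"], ["AAA", "ICN"]]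

def Spec_bfs (tickets : List (List String)) (out : List (List (List String))) : Prop :=
  out = bfs_alt tickets
instance (tickets : List (List String)) (out : List (List (List String))) :
    Decidable (Spec_bfs tickets out) := by unfold Spec_bfs; infer_instance

-- ===== CLAIM (what is proved, stated in full; the proofs are below) =====
def Claim_equal_bfs : Prop :=
  ∀ (tickets : List (List String)), Dom_bfs tickets → Pre_bfs tickets →
    Spec_bfs tickets (bfs tickets)

-- ===== LEMMAS AND PROOFS =====

-- B's inner loop = A's child generation followed by the recursive descent.
theorem goB_eq_innerA (tickets path remained : List (List String)) :
    ∀ ts, goB tickets path remained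
        ((PySem.List.pyGet? path (-1)).bind (fun last => PySem.List.pyGet? last 1)) ts =
      (innerA tickets path remained ts).flatMap (fun e => dfsB tickets e.2.1 e.2.2) := by
  intro ts
  induction ts with
  | nil => rw [goB.eq_def]; simp [innerA]
  | cons t rest ih =>
    rw [goB.eq_def, innerA]
    simp only
    rw [List.flatMap_append, ih]
    congr 1
    split
    · rcases hr : PySem.List.remove? remained t with _ | r' <;> simp
    · simp

theorem dfsB_eq (tickets path remained : List (List String)) :
    dfsB tickets path remained =
      if remained = [] then [path]
      else (innerA tickets path remained tickets).flatMap (fun e => dfsB tickets e.2.1 e.2.2) := by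
  rw [dfsB.eq_def]
  split
  · rfl
  · exact goB_eq_innerA tickets path remained tickets

theorem innerA_nil_rem (tickets vis : List (List String)) :
    ∀ ts, innerA tickets vis [] ts = [] := by
  intro ts
  induction ts with
  | nil => simp [innerA]
  | cons t rest ih => simp [innerA, ih]

-- The BFS/DFS agreement.  Invariant: the queue is q1 ++ q2 where every entry of q1 still has k
-- tickets remaining and every entry of q2 has k-1 (children of already-popped level-k entries);
-- paths and remainders always partition the tickets, so all complete paths sit at one depth and
-- the pop order of that level is exactly the left-to-right (DFS) order.
theorem loopA_eq_dfsB (tickets : List (List String)) :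
    ∀ (k : Nat) (q1 q2 : List ((List String) × List (List String) × List (List String))),
      (∀ e ∈ q1, e.2.1.length + e.2.2.length = tickets.length ∧ e.2.2.length = k) →
      (∀ e ∈ q2, e.2.1.length + e.2.2.length = tickets.length ∧ e.2.2.length + 1 = k) →
      loopA tickets (q1 ++ q2) =
        q2.flatMap (fun e => dfsB tickets e.2.1 e.2.2) ++
          q1.flatMap (fun e => dfsB tickets e.2.1 e.2.2) := by
  intro k
  induction k with
  | zero =>
    intro q1 q2 h1 h2
    have hq2 : q2 = [] := by
      cases q2 with
      | nil => rfl
      | cons e q2' => exact absurd ((h2 e (by simp)).2) (by omega)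
    subst hq2
    induction q1 with
    | nil => simp [loopA]
    | cons e q1' ih =>
      obtain ⟨c, vis, rem⟩ := e
      obtain ⟨hinv, hlen⟩ := h1 (c, vis, rem) (by simp)
      simp only at hinv hlen
      have hrem : rem = [] := List.eq_nil_of_length_eq_zero hlen
      subst hrem
      rw [List.append_nil, loopA, innerA_nil_rem]
      have hih := ih (fun e he => h1 e (by simp [he]))
      simp only [List.append_nil, List.flatMap_nil, List.nil_append] at hih ⊢
      rw [hih, if_pos (by omega)]
      simp only [List.flatMap_cons]
      rw [dfsB_eq]
      simp
  | succ k ihk =>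
    intro q1
    induction q1 with
    | nil =>
      intro q2 h1 h2
      have := ihk q2 []
        (fun e he => ⟨(h2 e he).1, by have := (h2 e he).2; omega⟩)
        (by intro e he; simp at he)
      simp only [List.append_nil, List.flatMap_nil, List.nil_append] at this ⊢
      exact this
    | cons e q1' ih =>
      intro q2 h1 h2
      obtain ⟨c, vis, rem⟩ := e
      obtain ⟨hinv, hlen⟩ := h1 (c, vis, rem) (by simp)
      simp only at hinv hlen
      rw [List.cons_append, loopA, if_neg (by omega)]
      have hchild : ∀ e ∈ innerA tickets vis rem tickets,
          e.2.1.length + e.2.2.length = tickets.length ∧ e.2.2.length + 1 = k + 1 := by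
        intro e he
        obtain ⟨h21, h22⟩ := innerA_rem_length he
        constructor <;> omega
      have hrec := ih (q2 ++ innerA tickets vis rem tickets)
        (fun e he => h1 e (by simp [he]))
        (by
          intro e he
          rcases List.mem_append.mp he with he | he
          · exact h2 e he
          · exact hchild e he)
      rw [List.append_assoc, hrec]
      have hremne : rem ≠ [] := by
        intro hc; subst hc; simp at hlen
      simp only [List.flatMap_append, List.flatMap_cons]
      rw [dfsB_eq, if_neg hremne]
      simp

theorem seedB_eq_initA (tickets : List (List String)) :
    ∀ ts, seedB tickets ts =
      (initA tickets ts).flatMap (fun e => dfsB tickets e.2.1 e.2.2) := by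
  intro ts
  induction ts with
  | nil => simp [seedB, initA]
  | cons t rest ih =>
    rw [seedB, initA, List.flatMap_append, ih]
    congr 1
    split
    · rcases hr : PySem.List.remove? tickets t with _ | start <;> simp
    · simp

theorem initA_shape (tickets : List (List String)) :
    ∀ {ts : List (List String)} {e}, e ∈ initA tickets ts →
      e.2.1.length = 1 ∧ e.2.2.length + 1 = tickets.length := by
  intro ts
  induction ts with
  | nil => intro e h; simp [initA] at h
  | cons t rest ih =>
    intro e h
    simp only [initA, List.mem_append] at h
    rcases h with h | h
    · split at h
      · rcases hr : PySem.List.remove? tickets t with _ | rem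
        · rw [hr] at h; simp at h
        · rw [hr] at h
          simp at h
          subst h
          exact ⟨by simp, remove?_length_succ hr⟩
      · simp at h
    · exact ih h

theorem bfs_eq_bfs_alt (tickets : List (List String)) : bfs tickets = bfs_alt tickets := by
  unfold bfs bfs_alt
  have h := loopA_eq_dfsB tickets (tickets.length - 1) (initA tickets tickets) []
    (fun e he => by
      obtain ⟨h1, h2⟩ := initA_shape tickets he
      constructor <;> omega)
    (by intro e he; simp at he)
  simp only [List.append_nil, List.flatMap_nil, List.nil_append] at h
  rw [h, seedB_eq_initA]

-- ===== VERDICT (by name: the statement is the Claim_ definition above) =====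
theorem bfs_spec : Claim_equal_bfs := by
  intro tickets _ _
  unfold Spec_bfs
  exact bfs_eq_bfs_alt tickets
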